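-- pv_equiv track=rewrite | github.com/jancpp/UDK-Nodejs-Sever | src/data_in.py | escape
-- ===== SOURCE A (Python) =====
-- def escape(s):
--     if s == None:
--         return s
--
--     ILLEGAL = ['\'', '\"', '\\', ':', '-', '_']
--     padding = 0
--     for i,c in enumerate(s):
--         if c in ILLEGAL:
--             s = s[:i+padding] + '\\' + s[i+padding:]
--             padding = padding+1
--     return s
-- ===== SOURCE B (Python) =====
-- def escape(s):
--     if s == None:
--         return s
--     ILLEGAL = ('\'', '\"', '\\', ':', '-', '_')
--     return ''.join('\\' + c if c in ILLEGAL else c for c in s)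
-- ===== Notes on version B (the rewrite author's own statement) =====
-- stated objective: simpler
-- what changed: Replaces the index/padding slice-insertion loop (quadratic string rebuilding) with a single join over a per-character generator that emits '\'+c for illegal characters.
import Mathlib
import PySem

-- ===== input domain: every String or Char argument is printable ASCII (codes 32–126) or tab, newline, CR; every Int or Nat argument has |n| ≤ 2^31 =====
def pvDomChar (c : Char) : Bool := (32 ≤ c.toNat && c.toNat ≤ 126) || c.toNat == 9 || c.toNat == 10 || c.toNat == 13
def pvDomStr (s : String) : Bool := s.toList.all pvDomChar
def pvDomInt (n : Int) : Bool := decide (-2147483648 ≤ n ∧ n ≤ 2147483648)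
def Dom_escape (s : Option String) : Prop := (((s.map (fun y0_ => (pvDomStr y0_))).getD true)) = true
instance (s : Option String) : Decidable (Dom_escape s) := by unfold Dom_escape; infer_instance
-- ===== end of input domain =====

-- B replaces A's index/padding slice-insertion loop by one per-character pass (join of '\'+c for illegal c): simpler, same result.


-- ===== PORT A =====
def escapeIllegal : List Char := ['\'', '\"', '\\', ':', '-', '_']

-- A's loop body: on illegal c at original index i, insert '\' at i+padding by slicing, bump padding.
def escapeStep (st : List Char × Int) (p : Int × Char) : List Char × Int :=
  if escapeIllegal.contains p.2 then
    (PySem.List.slice st.1 none (some (p.1 + st.2)) ++ ['\\'] ++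
       PySem.List.slice st.1 (some (p.1 + st.2)) none, st.2 + 1)
  else st

def escape (s : Option String) : Option String :=
  match s with
  | none => none
  | some str =>
      let cs := str.toList
      let res := (PySem.List.enumerate cs 0).foldl escapeStep (cs, 0)
      some (String.ofList res.1)

-- ===== PORT B =====
def escapeChar (c : Char) : List Char :=
  if escapeIllegal.contains c then ['\\', c] else [c]

def escape_alt (s : Option String) : Option String :=
  match s with
  | none => none
  | some str => some (String.ofList (str.toList.flatMap escapeChar))

-- ===== PRECONDITION & SPEC =====
def Spec_escape (s : Option String) (out : Option String) : Prop := out = escape_alt s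
instance (s : Option String) (out : Option String) : Decidable (Spec_escape s out) := by unfold Spec_escape; infer_instance

-- ===== CLAIM (what is proved, stated in full; the proofs are below) =====
def Claim_equal_escape : Prop := ∀ (s : Option String), Dom_escape s → Spec_escape s (escape s)

-- ===== LEMMAS AND PROOFS =====

-- Loop invariant: having rewritten the prefix to `pref` (with padding `pad` extra backslashes,
-- next original index `i`, so i + pad = pref.length), the rest of the loop escapes `rest` in place.
theorem escape_loop (rest : List Char) : ∀ (pref : List Char) (i pad : Int),
    0 ≤ pad → i + pad = pref.length →
    (PySem.List.enumerate rest i).foldl escapeStep (pref ++ rest, pad)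
      = (pref ++ rest.flatMap escapeChar, pad + (rest.countP (escapeIllegal.contains ·) : Int)) := by
  induction rest with
  | nil => intro pref i pad _ _; simp [PySem.List.enumerate_nil]
  | cons c rest ih =>
      intro pref i pad hpad hlen
      rw [PySem.List.enumerate_cons, List.foldl_cons]
      by_cases hc : escapeIllegal.contains c
      · have hstep : escapeStep (pref ++ c :: rest, pad) (i, c)
            = ((pref ++ ['\\', c]) ++ rest, pad + 1) := by
          simp only [escapeStep, hc, if_pos]
          have hmem : c ∈ escapeIllegal := by simpa using hc
          have h1 : PySem.List.slice (pref ++ c :: rest) none (some (i + pad))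
              = pref := by
            rw [hlen, PySem.List.slice_to_natCast]
            simp
          have h2 : PySem.List.slice (pref ++ c :: rest) (some (i + pad)) none
              = c :: rest := by
            rw [hlen, PySem.List.slice_from_natCast]
            simp
          rw [h1, h2]; simp
        rw [hstep, ih (pref ++ ['\\', c]) (i + 1) (pad + 1) (by omega)
              (by simp only [List.length_append, List.length_cons, List.length_nil]
                  push_cast; omega)]
        have hmem : c ∈ escapeIllegal := by simpa using hc
        simp [escapeChar, hmem]
        omega
      · have hmem : c ∉ escapeIllegal := by
          simp only [List.contains_eq_mem, decide_eq_true_eq] at hc; exact hc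
        have hstep : escapeStep (pref ++ c :: rest, pad) (i, c)
            = ((pref ++ [c]) ++ rest, pad) := by
          simp [escapeStep, hmem]
        rw [hstep, ih (pref ++ [c]) (i + 1) pad hpad
              (by simp only [List.length_append, List.length_cons, List.length_nil]
                  push_cast; omega)]
        simp [escapeChar, hmem]

-- ===== VERDICT (by name: the statement is the Claim_ definition above) =====
theorem escape_spec : Claim_equal_escape := by
  intro s _
  unfold Spec_escape escape escape_alt
  cases s with
  | none => rfl
  | some str =>
      simp only
      have h := escape_loop str.toList [] 0 0 le_rfl (by simp)
      simp only [List.nil_append] at h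
      rw [h]
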